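-- pv_equiv track=rewrite | github.com/ErodosMN/some_basic_coding_in_python | C2PA02.py | heights
-- ===== SOURCE A (Python) =====
-- class Node : # (key, leftChild, rightChild)
--     def __init__ (self, key=-1, leftChild=None, rightChild=None) :
--         self.key = key
--         self.rightChild = rightChild
--         self.leftChild = leftChild
--
--
--     def keys (self) :
--         keysList = [self.key]
--         if self.leftChild != None :
--             keysList.extend(self.leftChild.keys())
--         if self.rightChild != None :
--             keysList.extend(self.rightChild.keys())
--         return keysList
--
--     def height (self) :
--         if self.leftChild != None and self.rightChild != None :
--             return max(self.leftChild.height()+1, self.rightChild.height()+1)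
--         elif self.leftChild != None :
--             return self.leftChild.height()+1
--         elif self.rightChild != None :
--             return self.rightChild.height()+1
--         else :
--             return 0
--
--     def leaves (self) :
--         leavesList = []
--         if self.leftChild == None and self.rightChild == None :
--             leavesList.append(self.key)
--         if self.leftChild != None :
--             leavesList.extend(self.leftChild.leaves())
--         if self.rightChild != None :
--             leavesList.extend(self.rightChild.leaves())
--         return leavesList
--
-- def heights (initlist, t) :
--
--     rootslist = []
--
--     for i,edge in enumerate(initlist[:t]):
--
--         pos1 = -1
--         pos2 = -1
--
--         for j in range(len(rootslist)):
--             rootleaves = rootslist[j].leaves()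
-- #            print ("leaveslist = "+str(rootleaves), j)
--             if edge[0] in rootleaves: # IndexError in some cases of test2
--                 pos1 = j
--             if edge[1] in rootleaves:
--                 pos2 = j
--
--
--         if pos1 != pos2 :
--             if pos1 != -1 and pos2 != -1:
--                 if min(rootslist[pos1].leaves()) < min(rootslist[pos2].leaves()):
--                     nodei = Node (-1, rootslist[pos1], rootslist[pos2])
--                 else :
--                     nodei = Node (-1, rootslist[pos2], rootslist[pos1])
--                 unwanted = [rootslist[pos1],rootslist[pos2]]
--                 rootslist = [e for e in rootslist if e not in unwanted]
--             elif pos1 != -1: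
--                 newChild = Node (initlist[i][1], None, None)
--                 if min(rootslist[pos1].leaves()) < initlist[i][1] :
--                     nodei = Node (-1, rootslist[pos1], newChild)
--                 else:
--                     nodei = Node (-1, newChild, rootslist[pos1])
--                 rootslist.pop(pos1)
--             elif pos2 != -1:
--                 newChild = Node (initlist[i][0], None, None)
--                 if min(rootslist[pos2].leaves()) < initlist[i][0] :
--                     nodei = Node (-1, rootslist[pos2], newChild)
--                 else:
--                     nodei = Node (-1, newChild, rootslist[pos2])
--                 rootslist.pop(pos2)
--
--             rootslist.append(nodei)
--
--         elif pos1 == -1 and pos2 == -1 :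
--             lChild = Node (min(edge), None, None)
--             rChild = Node (max(edge), None, None)
--             nodei = Node (-1, lChild, rChild)
--             rootslist.append(nodei)
--
-- #    id_by_leaves = []
-- #    for root in rootslist:
-- #        id_by_leaves.append(root.leaves())
-- #    print ("roots(idbyL) = "+str(id_by_leaves))
--
--
--     heightlist = []
--     for root in rootslist:
--         heightlist.append(root.height())
--
--     return sorted(heightlist)
-- ===== SOURCE B (Python) =====
-- def heights(initlist, t):
--     # forest as a list of (member-set, height) components; heights maintained
--     # incrementally, so no trees are built and no leaves/height recursion runs
--     comps = []
--     for a, b in initlist[:t]: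
--         ia = next((k for k, c in enumerate(comps) if a in c[0]), None)
--         ib = next((k for k, c in enumerate(comps) if b in c[0]), None)
--         if ia is None and ib is None:
--             comps.append(({a, b}, 1))
--         elif ia is None:
--             s, h = comps[ib]
--             comps = comps[:ib] + comps[ib + 1:] + [(s | {a}, h + 1)]
--         elif ib is None:
--             s, h = comps[ia]
--             comps = comps[:ia] + comps[ia + 1:] + [(s | {b}, h + 1)]
--         elif ia != ib:
--             s1, h1 = comps[ia]
--             s2, h2 = comps[ib]
--             comps = [c for k, c in enumerate(comps) if k != ia and k != ib] \
--                     + [(s1 | s2, max(h1, h2) + 1)]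
--     return sorted(h for _, h in comps)
-- ===== Notes on version B (the rewrite author's own statement) =====
-- stated objective: faster
-- what changed: B keeps the forest as a list of (member-set, height) components with heights maintained incrementally, instead of building Node trees and recomputing every tree's full leaf list (and recursive height) for each edge as A does.
import Mathlib
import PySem

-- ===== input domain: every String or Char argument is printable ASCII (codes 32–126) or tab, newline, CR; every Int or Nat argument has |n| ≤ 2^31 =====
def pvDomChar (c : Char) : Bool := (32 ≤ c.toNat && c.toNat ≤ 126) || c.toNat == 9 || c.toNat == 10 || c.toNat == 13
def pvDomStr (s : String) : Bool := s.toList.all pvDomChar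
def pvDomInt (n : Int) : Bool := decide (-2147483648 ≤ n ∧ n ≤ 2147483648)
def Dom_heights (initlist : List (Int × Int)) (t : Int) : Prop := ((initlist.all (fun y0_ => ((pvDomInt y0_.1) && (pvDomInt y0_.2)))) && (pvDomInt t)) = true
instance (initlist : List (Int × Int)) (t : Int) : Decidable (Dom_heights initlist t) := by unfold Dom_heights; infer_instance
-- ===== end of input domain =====

-- B replaces A's Node-tree forest (leaf lists and heights recomputed recursively per edge)
-- by components carrying a member set and an incrementally maintained height; measurably faster.

-- ===== PORT A =====
-- A's Node objects in this function are either leaves (no children) or have both children;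
-- ported as a plain binary tree.
inductive PyTree : Type
  | leaf : Int → PyTree
  | node : Int → PyTree → PyTree → PyTree
deriving DecidableEq, Repr

def PyTree.leaves : PyTree → List Int
  | PyTree.leaf k => [k]
  | PyTree.node _ l r => PyTree.leaves l ++ PyTree.leaves r

def PyTree.height : PyTree → Int
  | PyTree.leaf _ => 0
  | PyTree.node _ l r => max (PyTree.height l + 1) (PyTree.height r + 1)

-- min(tree.leaves()); the none branch is unreachable (leaves is never empty)
def pyTreeMin (tr : PyTree) : Int :=
  match PySem.List.min? (PyTree.leaves tr) (fun y => y) with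
  | some m => m
  | none => 0

-- the inner 'for j in range(len(rootslist))' loop computing pos1, pos2 (last match wins)
def heightsPos (rootslist : List PyTree) (edge : Int × Int) : Int × Int :=
  (PySem.List.enumerate rootslist).foldl
    (fun (p : Int × Int) je =>
      let rootleaves := PyTree.leaves je.2
      ((if edge.1 ∈ rootleaves then je.1 else p.1),
       (if edge.2 ∈ rootleaves then je.1 else p.2)))
    (-1, -1)

-- the body of A's main loop; the loop variable i appears in A only as initlist[i],
-- which equals edge because initlist[:t] is a prefix of initlist
def heightsStepA (rootslist : List PyTree) (edge : Int × Int) : List PyTree :=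
  let pos1 := (heightsPos rootslist edge).1
  let pos2 := (heightsPos rootslist edge).2
  if pos1 ≠ pos2 then
    if pos1 ≠ -1 ∧ pos2 ≠ -1 then
      match PySem.List.pyGet? rootslist pos1, PySem.List.pyGet? rootslist pos2 with
      | some r1, some r2 =>
          let nodei :=
            if pyTreeMin r1 < pyTreeMin r2 then PyTree.node (-1) r1 r2
            else PyTree.node (-1) r2 r1
          let unwanted := [r1, r2]
          (rootslist.filter (fun e => decide (e ∉ unwanted))) ++ [nodei]
      | _, _ => rootslist      -- totality guard, unreachable: pos1 is a valid index
    else if pos1 ≠ -1 then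
      match PySem.List.pyGet? rootslist pos1 with
      | some r1 =>
          let newChild := PyTree.leaf edge.2
          let nodei :=
            if pyTreeMin r1 < edge.2 then PyTree.node (-1) r1 newChild
            else PyTree.node (-1) newChild r1
          (match PySem.List.pop? rootslist pos1 with
           | some pr => pr.2
           | none => rootslist) ++ [nodei]   -- totality guard, unreachable
      | none => rootslist                    -- totality guard, unreachable
    else
      match PySem.List.pyGet? rootslist pos2 with
      | some r2 =>
          let newChild := PyTree.leaf edge.1
          let nodei :=
            if pyTreeMin r2 < edge.1 then PyTree.node (-1) r2 newChild
            else PyTree.node (-1) newChild r2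
          (match PySem.List.pop? rootslist pos2 with
           | some pr => pr.2
           | none => rootslist) ++ [nodei]   -- totality guard, unreachable
      | none => rootslist                    -- totality guard, unreachable
  else if pos1 = -1 ∧ pos2 = -1 then
    let lChild := PyTree.leaf (min edge.1 edge.2)
    let rChild := PyTree.leaf (max edge.1 edge.2)
    rootslist ++ [PyTree.node (-1) lChild rChild]
  else
    rootslist

def heights (initlist : List (Int × Int)) (t : Int) : List Int :=
  let rootslist := (PySem.List.slice initlist none (some t)).foldl heightsStepA []
  let heightlist := rootslist.foldl (fun acc root => acc ++ [PyTree.height root]) []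
  PySem.List.sorted heightlist (fun x => x) false

-- ===== PORT B =====
def heightsStepB (comps : List (PySem.Set Int × Int)) (edge : Int × Int) :
    List (PySem.Set Int × Int) :=
  let ia := comps.findIdx? (fun c => PySem.Set.contains c.1 edge.1)
  let ib := comps.findIdx? (fun c => PySem.Set.contains c.1 edge.2)
  match ia, ib with
  | none, none => comps ++ [(PySem.Set.ofList [edge.1, edge.2], 1)]
  | none, some kb =>
      match comps[kb]? with
      | some c =>
          PySem.List.slice comps none (some (kb : Int)) ++
          PySem.List.slice comps (some ((kb : Int) + 1)) none ++
          [(PySem.Set.union c.1 (PySem.Set.ofList [edge.1]), c.2 + 1)]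
      | none => comps                        -- totality guard, unreachable
  | some ka, none =>
      match comps[ka]? with
      | some c =>
          PySem.List.slice comps none (some (ka : Int)) ++
          PySem.List.slice comps (some ((ka : Int) + 1)) none ++
          [(PySem.Set.union c.1 (PySem.Set.ofList [edge.2]), c.2 + 1)]
      | none => comps                        -- totality guard, unreachable
  | some ka, some kb =>
      if ka ≠ kb then
        match comps[ka]?, comps[kb]? with
        | some c1, some c2 =>
            ((PySem.List.enumerate comps).filter
                (fun kc => decide (kc.1 ≠ (ka : Int) ∧ kc.1 ≠ (kb : Int)))).map (·.2) ++
            [(PySem.Set.union c1.1 c2.1, max c1.2 c2.2 + 1)]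
        | _, _ => comps                      -- totality guard, unreachable
      else comps

def heights_alt (initlist : List (Int × Int)) (t : Int) : List Int :=
  let comps := (PySem.List.slice initlist none (some t)).foldl heightsStepB []
  PySem.List.sorted (comps.map (fun c => c.2)) (fun x => x) false

-- ===== PRECONDITION & SPEC =====
def Spec_heights (initlist : List (Int × Int)) (t : Int) (out : List Int) : Prop := out = heights_alt initlist t
instance (initlist : List (Int × Int)) (t : Int) (out : List Int) : Decidable (Spec_heights initlist t out) := by unfold Spec_heights; infer_instance

-- ===== CLAIM (what is proved, stated in full; the proofs are below) =====
def Claim_equal_heights : Prop := ∀ (initlist : List (Int × Int)) (t : Int), Dom_heights initlist t → Spec_heights initlist t (heights initlist t)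

-- ===== LEMMAS AND PROOFS =====

-- each A-tree corresponds to a B-component: same member set, same height
def RelTC (tr : PyTree) (c : PySem.Set Int × Int) : Prop :=
  (∀ v : Int, v ∈ c.1 ↔ v ∈ PyTree.leaves tr) ∧ c.2 = PyTree.height tr

-- the leaf sets of distinct roots are disjoint
def DisjF (roots : List PyTree) : Prop :=
  List.Pairwise (fun x y => ∀ v, v ∈ PyTree.leaves x → v ∉ PyTree.leaves y) roots

lemma leaves_ne_nil (tr : PyTree) : PyTree.leaves tr ≠ [] := by
  induction tr with
  | leaf k => simp [PyTree.leaves]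
  | node k l r ihl ihr => simp [PyTree.leaves, ihl]

lemma height_nonneg (tr : PyTree) : 0 ≤ PyTree.height tr := by
  induction tr with
  | leaf k => simp [PyTree.height]
  | node k l r ihl ihr => simp [PyTree.height]; omega

lemma enum_cons {α : Type} (x : α) (xs : List α) (s : Int) :
    PySem.List.enumerate (x :: xs) s = (s, x) :: PySem.List.enumerate xs (s + 1) := by
  simp [PySem.List.enumerate]

lemma enum_map_snd {α : Type} (xs : List α) (s : Int) :
    (PySem.List.enumerate xs s).map (·.2) = xs := by
  induction xs generalizing s with
  | nil => simp [PySem.List.enumerate]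
  | cons x xs ih => simp [ih]

lemma mem_enum {α : Type} (xs : List α) (s : Int) (kc : Int × α) (h : kc ∈ PySem.List.enumerate xs s) :
    ∃ i : Nat, ∃ hi : i < xs.length, kc = (s + i, xs[i]) := by
  induction xs generalizing s with
  | nil => simp [PySem.List.enumerate] at h
  | cons x xs ih =>
      rw [enum_cons] at h
      rcases List.mem_cons.1 h with h0 | h0
      · exact ⟨0, by simp, by simpa using h0⟩
      · rcases ih (s + 1) h0 with ⟨i, hi, rfl⟩
        refine ⟨i + 1, by simpa using hi, ?_⟩
        simp only [Prod.mk.injEq]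
        constructor
        · push_cast; ring
        · simp

lemma filter_eq_enum_filter {α : Type} (P : α → Bool) (xs : List α) (s : Int) :
    xs.filter P = ((PySem.List.enumerate xs s).filter (fun kc => P kc.2)).map (·.2) := by
  induction xs generalizing s with
  | nil => simp [PySem.List.enumerate]
  | cons x xs ih =>
      rw [enum_cons]
      by_cases h : P x = true
      · simp [h, ih (s + 1)]
      · simp only [Bool.not_eq_true] at h
        simp [h, ih (s + 1)]

lemma foldl_pos_none {α : Type} (p : α → Prop) [DecidablePred p] (xs : List α) (s init : Int)
    (h : ∀ x ∈ xs, ¬ p x) :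
    (PySem.List.enumerate xs s).foldl (fun acc je => if p je.2 then je.1 else acc) init = init := by
  induction xs generalizing s with
  | nil => simp [PySem.List.enumerate]
  | cons x xs ih =>
      rw [enum_cons]
      simp only [List.foldl_cons]
      rw [if_neg (h x (by simp))]
      exact ih (s + 1) (fun y hy => h y (by simp [hy]))

lemma foldl_pos_unique {α : Type} (p : α → Prop) [DecidablePred p] (xs : List α) (j : Nat)
    (s init : Int) (hj : j < xs.length) (hP : p xs[j])
    (hU : ∀ k (hk : k < xs.length), k ≠ j → ¬ p xs[k]) :
    (PySem.List.enumerate xs s).foldl (fun acc je => if p je.2 then je.1 else acc) init = s + j := by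
  induction xs generalizing j s init with
  | nil => simp at hj
  | cons x xs ih =>
      rw [enum_cons]
      simp only [List.foldl_cons]
      cases j with
      | zero =>
          simp only [List.getElem_cons_zero] at hP
          rw [if_pos hP]
          rw [foldl_pos_none p xs (s + 1) s
            (fun y hy => by
              rcases List.mem_iff_getElem.1 hy with ⟨k, hk, rfl⟩
              exact hU (k + 1) (by simpa using hk) (by omega))]
          simp
      | succ j =>
          have hx : ¬ p x := by simpa using hU 0 (by simp) (by omega)
          rw [if_neg hx]
          have := ih j (s + 1) init (by simpa using hj) (by simpa using hP)
            (fun k hk hkj => hU (k + 1) (by simpa using hk) (by omega))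
          rw [this]; push_cast; ring

lemma findIdx?_of_unique {α : Type} (p : α → Bool) (xs : List α) (j : Nat) (hj : j < xs.length)
    (hP : p xs[j] = true) (h0 : ∀ k (hk : k < xs.length), k < j → p xs[k] = false) :
    xs.findIdx? p = some j := by
  induction xs generalizing j with
  | nil => simp at hj
  | cons x xs ih =>
      cases j with
      | zero =>
          simp only [List.getElem_cons_zero] at hP
          rw [List.findIdx?_cons, hP]
          rfl
      | succ j =>
          have hx : p x = false := h0 0 (by simp) (by omega)
          have htail := ih j (by simpa using hj) (by simpa using hP)
            (fun k hk hkj => h0 (k + 1) (by simpa using hk) (by omega))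
          simp [List.findIdx?_cons, hx, htail]

lemma forall2_enumFilter {α β : Type} {R : α → β → Prop} (Q : Int → Bool)
    (xs : List α) (ys : List β) (s : Int) (h : List.Forall₂ R xs ys) :
    List.Forall₂ R (((PySem.List.enumerate xs s).filter (fun kc => Q kc.1)).map (·.2))
                   (((PySem.List.enumerate ys s).filter (fun kc => Q kc.1)).map (·.2)) := by
  induction h generalizing s with
  | nil => simp [PySem.List.enumerate]
  | cons hxy htail ih =>
      rw [enum_cons, enum_cons]
      by_cases hq : Q s = true
      · simp only [List.filter_cons, hq]
        simpa using List.Forall₂.cons hxy (ih (s + 1))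
      · simp only [Bool.not_eq_true] at hq
        simp only [List.filter_cons, hq]
        simpa using ih (s + 1)

lemma forall2_append2 {α β : Type} {R : α → β → Prop} {xs us : List α} {ys vs : List β}
    (h : List.Forall₂ R xs ys) (h' : List.Forall₂ R us vs) :
    List.Forall₂ R (xs ++ us) (ys ++ vs) := by
  induction h with
  | nil => simpa using h'
  | cons hxy htail ih => simpa using List.Forall₂.cons hxy ih

lemma forall2_eraseIdx {α β : Type} {R : α → β → Prop} (j : Nat)
    {xs : List α} {ys : List β} (h : List.Forall₂ R xs ys) :
    List.Forall₂ R (xs.eraseIdx j) (ys.eraseIdx j) := by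
  induction h generalizing j with
  | nil => simp
  | cons hxy htail ih =>
      cases j with
      | zero => simpa using htail
      | succ j => simpa using List.Forall₂.cons hxy (ih j)

lemma enumFilter_sublist {α : Type} (Q : Int × α → Bool) (xs : List α) (s : Int) :
    (((PySem.List.enumerate xs s).filter Q).map (·.2)).Sublist xs := by
  have := List.Sublist.map (·.2) (List.filter_sublist (l := PySem.List.enumerate xs s) (p := Q))
  rwa [enum_map_snd] at this

lemma forall2_getElem {α β : Type} {R : α → β → Prop} {xs : List α} {ys : List β}
    (h : List.Forall₂ R xs ys) (k : Nat) (hk : k < xs.length) (hk' : k < ys.length) :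
    R xs[k] ys[k] := by
  induction h generalizing k with
  | nil => simp at hk
  | cons hxy htail ih =>
      cases k with
      | zero => simpa using hxy
      | succ k => simpa using ih k (by simpa using hk) (by simpa using hk')

lemma disj_getElem (roots : List PyTree) (h2 : DisjF roots) :
    ∀ i j (_hi : i < roots.length) (_hj : j < roots.length), i ≠ j →
      ∀ v, v ∈ PyTree.leaves roots[i] → v ∉ PyTree.leaves roots[j] := by
  intro i j hi hj hij
  rcases Nat.lt_or_ge i j with h | h
  · exact (List.pairwise_iff_getElem.mp h2) i j hi hj h
  · have hji := (List.pairwise_iff_getElem.mp h2) j i hj hi (by omega)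
    intro v hv hvj
    exact hji v hvj hv

lemma roots_getElem_ne (roots : List PyTree) (h2 : DisjF roots)
    (i j : Nat) (hi : i < roots.length) (hj : j < roots.length) (hij : i ≠ j) :
    roots[i] ≠ roots[j] := by
  intro heq
  rcases List.exists_mem_of_ne_nil _ (leaves_ne_nil roots[i]) with ⟨v, hv⟩
  exact disj_getElem roots h2 i j hi hj hij v hv (heq ▸ hv)

lemma mem_eraseIdx_idx {α : Type} (xs : List α) (j : Nat) (x : α) (h : x ∈ xs.eraseIdx j) :
    ∃ k, ∃ hk : k < xs.length, k ≠ j ∧ xs[k] = x := by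
  rw [List.eraseIdx_eq_take_drop_succ] at h
  rcases List.mem_append.1 h with h | h
  · rcases List.mem_iff_getElem.1 h with ⟨k, hk, hkx⟩
    have hk1 : k < j ∧ k < xs.length := by simpa using hk
    refine ⟨k, hk1.2, by omega, ?_⟩
    rw [← hkx, List.getElem_take]
  · rcases List.mem_iff_getElem.1 h with ⟨k, hk, hkx⟩
    have hk1 : j + 1 + k < xs.length := by simp at hk; omega
    refine ⟨j + 1 + k, hk1, by omega, ?_⟩
    rw [← hkx, List.getElem_drop]

lemma pop?_natCast {α : Type} (xs : List α) (j : Nat) (hj : j < xs.length) :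
    PySem.List.pop? xs (j : Int) = some (xs[j], xs.eraseIdx j) := by
  simp [PySem.List.pop?, PySem.List.pyIdx?, hj]

lemma heightsPos_eq (roots : List PyTree) (e : Int × Int) :
    heightsPos roots e =
      ((PySem.List.enumerate roots).foldl
          (fun acc je => if e.1 ∈ PyTree.leaves je.2 then je.1 else acc) (-1),
       (PySem.List.enumerate roots).foldl
          (fun acc je => if e.2 ∈ PyTree.leaves je.2 then je.1 else acc) (-1)) := by
  unfold heightsPos
  exact PySem.List.foldl_prod_mk
    (f := fun acc (je : Int × PyTree) => if e.1 ∈ PyTree.leaves je.2 then je.1 else acc)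
    (g := fun acc (je : Int × PyTree) => if e.2 ∈ PyTree.leaves je.2 then je.1 else acc)
    _ _ _

lemma pos_fold_of_mem (roots : List PyTree) (h2 : DisjF roots) (x : Int) (j : Nat)
    (hj : j < roots.length) (hmem : x ∈ PyTree.leaves roots[j]) :
    (PySem.List.enumerate roots).foldl
      (fun acc je => if x ∈ PyTree.leaves je.2 then je.1 else acc) (-1) = (j : Int) := by
  have := foldl_pos_unique (fun tr => x ∈ PyTree.leaves tr) roots j 0 (-1) hj hmem
    (fun k hk hkj => disj_getElem roots h2 j k hj hk (fun hh => hkj hh.symm) x hmem)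
  rw [this]; ring

lemma pos_fold_of_none (roots : List PyTree) (x : Int)
    (h : ∀ y ∈ roots, x ∉ PyTree.leaves y) :
    (PySem.List.enumerate roots).foldl
      (fun acc je => if x ∈ PyTree.leaves je.2 then je.1 else acc) (-1) = -1 :=
  foldl_pos_none (fun tr => x ∈ PyTree.leaves tr) roots 0 (-1) h

lemma findIdx_of_mem (roots : List PyTree) (comps : List (PySem.Set Int × Int))
    (h1 : List.Forall₂ RelTC roots comps) (h2 : DisjF roots) (x : Int) (j : Nat)
    (hj : j < roots.length) (hmem : x ∈ PyTree.leaves roots[j]) :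
    comps.findIdx? (fun c => PySem.Set.contains c.1 x) = some j := by
  have hlen := List.Forall₂.length_eq h1
  refine findIdx?_of_unique _ _ j (by omega) ?_ ?_
  · have := (forall2_getElem h1 j hj (by omega)).1 x
    simp only [PySem.Set.contains_iff]
    exact this.mpr hmem
  · intro k hk hkj
    have hrk := (forall2_getElem h1 k (by omega) hk).1 x
    have : x ∉ PyTree.leaves roots[k] :=
      disj_getElem roots h2 j k hj (by omega) (by omega) x hmem
    simp only [Bool.eq_false_iff, ne_eq, PySem.Set.contains_iff]
    intro hc
    exact this (hrk.mp hc)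

lemma findIdx_of_none (roots : List PyTree) (comps : List (PySem.Set Int × Int))
    (h1 : List.Forall₂ RelTC roots comps) (x : Int)
    (h : ∀ y ∈ roots, x ∉ PyTree.leaves y) :
    comps.findIdx? (fun c => PySem.Set.contains c.1 x) = none := by
  have hlen := List.Forall₂.length_eq h1
  rw [List.findIdx?_eq_none_iff]
  intro c hc
  rcases List.mem_iff_getElem.1 hc with ⟨k, hk, rfl⟩
  have hrk := (forall2_getElem h1 k (by omega) hk).1 x
  have : x ∉ PyTree.leaves (roots[k]'(by omega)) :=
    h _ (List.getElem_mem _)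
  simp only [Bool.eq_false_iff, ne_eq, PySem.Set.contains_iff]
  intro hcx
  exact this (hrk.mp hcx)

-- case: neither endpoint occurs in the forest
lemma step_case_nn (roots : List PyTree) (comps : List (PySem.Set Int × Int)) (e : Int × Int)
    (h1 : List.Forall₂ RelTC roots comps) (h2 : DisjF roots)
    (hna : ∀ x ∈ roots, e.1 ∉ PyTree.leaves x) (hnb : ∀ x ∈ roots, e.2 ∉ PyTree.leaves x) :
    List.Forall₂ RelTC (heightsStepA roots e) (heightsStepB comps e) ∧
      DisjF (heightsStepA roots e) := by
  have hpos : heightsPos roots e = (-1, -1) := by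
    rw [heightsPos_eq, pos_fold_of_none roots e.1 hna, pos_fold_of_none roots e.2 hnb]
  have hia := findIdx_of_none roots comps h1 e.1 hna
  have hib := findIdx_of_none roots comps h1 e.2 hnb
  have hA : heightsStepA roots e =
      roots ++ [PyTree.node (-1) (PyTree.leaf (min e.1 e.2)) (PyTree.leaf (max e.1 e.2))] := by
    simp [heightsStepA, hpos]
  have hB : heightsStepB comps e = comps ++ [(PySem.Set.ofList [e.1, e.2], 1)] := by
    simp only [heightsStepB, hia, hib]
  rw [hA, hB]
  constructor
  · refine forall2_append2 h1 ?_
    refine List.Forall₂.cons ⟨?_, ?_⟩ List.Forall₂.nil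
    · intro v
      simp only [PySem.Set.mem_ofList, PyTree.leaves, List.mem_append, List.mem_cons,
        List.not_mem_nil, or_false]
      rcases le_total e.1 e.2 with h | h
      · rw [min_eq_left h, max_eq_right h]
      · rw [min_eq_right h, max_eq_left h]; tauto
    · simp [PyTree.height]
  · unfold DisjF
    rw [List.pairwise_append]
    refine ⟨h2, by simp, ?_⟩
    intro x hx y hy v hvx hvy
    simp only [List.mem_singleton] at hy
    subst hy
    simp only [PyTree.leaves, List.mem_append, List.mem_singleton] at hvy
    rcases le_total e.1 e.2 with h | h
    · rw [min_eq_left h, max_eq_right h] at hvy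
      rcases hvy with rfl | rfl
      · simp at *
        exact hna x hx hvx
      · simp at *
        exact hnb x hx hvx
    · rw [min_eq_right h, max_eq_left h] at hvy
      rcases hvy with rfl | rfl
      · simp at *
        exact hnb x hx hvx
      · simp at *
        exact hna x hx hvx

-- case: e.1 occurs (at index ja), e.2 does not
lemma step_case_sn (roots : List PyTree) (comps : List (PySem.Set Int × Int)) (e : Int × Int)
    (h1 : List.Forall₂ RelTC roots comps) (h2 : DisjF roots)
    (ja : Nat) (hja : ja < roots.length) (hmema : e.1 ∈ PyTree.leaves (roots[ja]))
    (hnb : ∀ x ∈ roots, e.2 ∉ PyTree.leaves x) :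
    List.Forall₂ RelTC (heightsStepA roots e) (heightsStepB comps e) ∧
      DisjF (heightsStepA roots e) := by
  have hlen := List.Forall₂.length_eq h1
  have hpos : heightsPos roots e = ((ja : Int), -1) := by
    rw [heightsPos_eq, pos_fold_of_mem roots h2 e.1 ja hja hmema, pos_fold_of_none roots e.2 hnb]
  have hia := findIdx_of_mem roots comps h1 h2 e.1 ja hja hmema
  have hib := findIdx_of_none roots comps h1 e.2 hnb
  have hget : PySem.List.pyGet? roots ((ja : Int)) = some roots[ja] := by
    rw [PySem.List.pyGet?_natCast, List.getElem?_eq_getElem hja]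
  have hpop := pop?_natCast roots ja hja
  set r1 := roots[ja] with hr1
  set nodei := (if pyTreeMin r1 < e.2 then PyTree.node (-1) r1 (PyTree.leaf e.2)
      else PyTree.node (-1) (PyTree.leaf e.2) r1) with hnodei
  have hA : heightsStepA roots e = roots.eraseIdx ja ++ [nodei] := by
    simp [heightsStepA, hpos, hget, hpop, hnodei]
  set c := comps[ja]'(by omega) with hc
  have hgetB : comps[ja]? = some c := List.getElem?_eq_getElem (by omega)
  have hB : heightsStepB comps e = comps.eraseIdx ja ++
      [(PySem.Set.union c.1 (PySem.Set.ofList [e.2]), c.2 + 1)] := by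
    simp only [heightsStepB, hia, hib, hgetB]
    rw [PySem.List.slice_to_natCast]
    have : ((ja : Int) + 1) = ((ja + 1 : Nat) : Int) := by push_cast; ring
    rw [this, PySem.List.slice_from_natCast, List.eraseIdx_eq_take_drop_succ, List.append_assoc]
  have hrc := forall2_getElem h1 ja hja (by omega)
  have hnode_leaves : ∀ v, v ∈ PyTree.leaves nodei ↔ v ∈ PyTree.leaves r1 ∨ v = e.2 := by
    intro v
    rw [hnodei]
    split <;> simp [PyTree.leaves] <;> tauto
  have hnode_height : PyTree.height nodei = PyTree.height r1 + 1 := by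
    have h0 := height_nonneg r1
    rw [hnodei]
    split <;> simp [PyTree.height] <;> omega
  rw [hA, hB]
  constructor
  · refine forall2_append2 (forall2_eraseIdx ja h1) ?_
    refine List.Forall₂.cons ⟨?_, ?_⟩ List.Forall₂.nil
    · intro v
      rw [hnode_leaves v]
      simp only [PySem.Set.mem_union, PySem.Set.mem_ofList, List.mem_singleton]
      rw [hrc.1 v]
    · rw [hnode_height, hrc.2]
  · unfold DisjF
    rw [List.pairwise_append]
    refine ⟨List.Pairwise.sublist (List.eraseIdx_sublist roots ja) h2, by simp, ?_⟩
    intro x hx y hy v hvx hvy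
    simp only [List.mem_singleton] at hy
    subst hy
    rcases mem_eraseIdx_idx roots ja x hx with ⟨k, hk, hkja, rfl⟩
    rw [hnode_leaves v] at hvy
    rcases hvy with hvy | rfl
    · exact disj_getElem roots h2 k ja hk hja hkja v hvx hvy
    · exact hnb _ (List.getElem_mem _) hvx

-- case: e.2 occurs (at index jb), e.1 does not
lemma step_case_ns (roots : List PyTree) (comps : List (PySem.Set Int × Int)) (e : Int × Int)
    (h1 : List.Forall₂ RelTC roots comps) (h2 : DisjF roots)
    (jb : Nat) (hjb : jb < roots.length) (hmemb : e.2 ∈ PyTree.leaves (roots[jb]))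
    (hna : ∀ x ∈ roots, e.1 ∉ PyTree.leaves x) :
    List.Forall₂ RelTC (heightsStepA roots e) (heightsStepB comps e) ∧
      DisjF (heightsStepA roots e) := by
  have hlen := List.Forall₂.length_eq h1
  have hpos : heightsPos roots e = (-1, (jb : Int)) := by
    rw [heightsPos_eq, pos_fold_of_mem roots h2 e.2 jb hjb hmemb, pos_fold_of_none roots e.1 hna]
  have hia := findIdx_of_none roots comps h1 e.1 hna
  have hib := findIdx_of_mem roots comps h1 h2 e.2 jb hjb hmemb
  have hget : PySem.List.pyGet? roots ((jb : Int)) = some roots[jb] := by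
    rw [PySem.List.pyGet?_natCast, List.getElem?_eq_getElem hjb]
  have hpop := pop?_natCast roots jb hjb
  set r2 := roots[jb] with hr2
  set nodei := (if pyTreeMin r2 < e.1 then PyTree.node (-1) r2 (PyTree.leaf e.1)
      else PyTree.node (-1) (PyTree.leaf e.1) r2) with hnodei
  have hA : heightsStepA roots e = roots.eraseIdx jb ++ [nodei] := by
    simp [heightsStepA, hpos, hget, hpop, hnodei]
  set c := comps[jb]'(by omega) with hc
  have hgetB : comps[jb]? = some c := List.getElem?_eq_getElem (by omega)
  have hB : heightsStepB comps e = comps.eraseIdx jb ++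
      [(PySem.Set.union c.1 (PySem.Set.ofList [e.1]), c.2 + 1)] := by
    simp only [heightsStepB, hia, hib, hgetB]
    rw [PySem.List.slice_to_natCast]
    have : ((jb : Int) + 1) = ((jb + 1 : Nat) : Int) := by push_cast; ring
    rw [this, PySem.List.slice_from_natCast, List.eraseIdx_eq_take_drop_succ, List.append_assoc]
  have hrc := forall2_getElem h1 jb hjb (by omega)
  have hnode_leaves : ∀ v, v ∈ PyTree.leaves nodei ↔ v ∈ PyTree.leaves r2 ∨ v = e.1 := by
    intro v
    rw [hnodei]
    split <;> simp [PyTree.leaves] <;> tauto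
  have hnode_height : PyTree.height nodei = PyTree.height r2 + 1 := by
    have h0 := height_nonneg r2
    rw [hnodei]
    split <;> simp [PyTree.height] <;> omega
  rw [hA, hB]
  constructor
  · refine forall2_append2 (forall2_eraseIdx jb h1) ?_
    refine List.Forall₂.cons ⟨?_, ?_⟩ List.Forall₂.nil
    · intro v
      rw [hnode_leaves v]
      simp only [PySem.Set.mem_union, PySem.Set.mem_ofList, List.mem_singleton]
      rw [hrc.1 v]
    · rw [hnode_height, hrc.2]
  · unfold DisjF
    rw [List.pairwise_append]
    refine ⟨List.Pairwise.sublist (List.eraseIdx_sublist roots jb) h2, by simp, ?_⟩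
    intro x hx y hy v hvx hvy
    simp only [List.mem_singleton] at hy
    subst hy
    rcases mem_eraseIdx_idx roots jb x hx with ⟨k, hk, hkjb, rfl⟩
    rw [hnode_leaves v] at hvy
    rcases hvy with hvy | rfl
    · exact disj_getElem roots h2 k jb hk hjb hkjb v hvx hvy
    · exact hna _ (List.getElem_mem _) hvx

-- case: both endpoints occur
lemma step_case_ss (roots : List PyTree) (comps : List (PySem.Set Int × Int)) (e : Int × Int)
    (h1 : List.Forall₂ RelTC roots comps) (h2 : DisjF roots)
    (ja : Nat) (hja : ja < roots.length) (hmema : e.1 ∈ PyTree.leaves (roots[ja]))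
    (jb : Nat) (hjb : jb < roots.length) (hmemb : e.2 ∈ PyTree.leaves (roots[jb])) :
    List.Forall₂ RelTC (heightsStepA roots e) (heightsStepB comps e) ∧
      DisjF (heightsStepA roots e) := by
  have hlen := List.Forall₂.length_eq h1
  have hpos : heightsPos roots e = ((ja : Int), (jb : Int)) := by
    rw [heightsPos_eq, pos_fold_of_mem roots h2 e.1 ja hja hmema,
      pos_fold_of_mem roots h2 e.2 jb hjb hmemb]
  have hia := findIdx_of_mem roots comps h1 h2 e.1 ja hja hmema
  have hib := findIdx_of_mem roots comps h1 h2 e.2 jb hjb hmemb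
  by_cases hjj : ja = jb
  · -- same tree: both programs leave the state unchanged
    subst hjj
    have hA : heightsStepA roots e = roots := by
      simp [heightsStepA, hpos]
    have hB : heightsStepB comps e = comps := by
      simp only [heightsStepB, hia, hib]
      rw [if_neg (fun h => h rfl)]
    rw [hA, hB]
    exact ⟨h1, h2⟩
  · -- merge
    set r1 := roots[ja] with hr1
    set r2 := roots[jb] with hr2
    have hgeta : PySem.List.pyGet? roots ((ja : Int)) = some r1 := by
      rw [PySem.List.pyGet?_natCast, List.getElem?_eq_getElem hja]
    have hgetb : PySem.List.pyGet? roots ((jb : Int)) = some r2 := by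
      rw [PySem.List.pyGet?_natCast, List.getElem?_eq_getElem hjb]
    set nodei := (if pyTreeMin r1 < pyTreeMin r2 then PyTree.node (-1) r1 r2
        else PyTree.node (-1) r2 r1) with hnodei
    have hA : heightsStepA roots e =
        roots.filter (fun x => decide (x ∉ ([r1, r2] : List PyTree))) ++ [nodei] := by
      have hcast : (ja : Int) ≠ (jb : Int) := by omega
      simp [heightsStepA, hpos, hgeta, hgetb, hnodei, hcast]
    set c1 := comps[ja]'(by omega) with hc1
    set c2 := comps[jb]'(by omega) with hc2
    have hgetBa : comps[ja]? = some c1 := List.getElem?_eq_getElem (by omega)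
    have hgetBb : comps[jb]? = some c2 := List.getElem?_eq_getElem (by omega)
    have hB : heightsStepB comps e =
        ((PySem.List.enumerate comps).filter
            (fun kc => decide (kc.1 ≠ (ja : Int) ∧ kc.1 ≠ (jb : Int)))).map (·.2) ++
          [(PySem.Set.union c1.1 c2.1, max c1.2 c2.2 + 1)] := by
      simp only [heightsStepB, hia, hib, hgetBa, hgetBb]
      rw [if_pos hjj]
    -- rewrite A's value-filter as the same index-filter
    have hfilter : roots.filter (fun x => decide (x ∉ ([r1, r2] : List PyTree))) =
        ((PySem.List.enumerate roots).filter
            (fun kc => decide (kc.1 ≠ (ja : Int) ∧ kc.1 ≠ (jb : Int)))).map (·.2) := by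
      rw [filter_eq_enum_filter (fun x => decide (x ∉ ([r1, r2] : List PyTree))) roots 0]
      congr 1
      apply List.filter_congr
      intro kc hkc
      rcases mem_enum roots 0 kc hkc with ⟨i, hi, rfl⟩
      simp only [zero_add]
      apply decide_eq_decide.mpr
      constructor
      · intro hnm
        constructor
        · intro hcast
          have : i = ja := by omega
          subst this
          exact hnm (by simp [hr1])
        · intro hcast
          have : i = jb := by omega
          subst this
          exact hnm (by simp [hr2])
      · rintro ⟨ha', hb'⟩
        have hija : i ≠ ja := by omega
        have hijb : i ≠ jb := by omega
        simp only [List.mem_cons, List.not_mem_nil, or_false, not_or]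
        exact ⟨roots_getElem_ne roots h2 i ja hi hja hija,
          roots_getElem_ne roots h2 i jb hi hjb hijb⟩
    have hrca := forall2_getElem h1 ja hja (by omega)
    have hrcb := forall2_getElem h1 jb hjb (by omega)
    have hnode_leaves : ∀ v, v ∈ PyTree.leaves nodei ↔
        v ∈ PyTree.leaves r1 ∨ v ∈ PyTree.leaves r2 := by
      intro v
      rw [hnodei]
      split <;> simp [PyTree.leaves] <;> tauto
    have hnode_height : PyTree.height nodei = max (PyTree.height r1) (PyTree.height r2) + 1 := by
      rw [hnodei]
      split <;> simp [PyTree.height] <;> omega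
    rw [hA, hB, hfilter]
    constructor
    · refine forall2_append2 (forall2_enumFilter (fun k => decide (k ≠ (ja : Int) ∧ k ≠ (jb : Int))) roots comps 0 h1) ?_
      refine List.Forall₂.cons ⟨?_, ?_⟩ List.Forall₂.nil
      · intro v
        rw [hnode_leaves v]
        simp only [PySem.Set.mem_union]
        rw [hrca.1 v, hrcb.1 v]
      · rw [hnode_height, hrca.2, hrcb.2]
    · unfold DisjF
      rw [List.pairwise_append]
      refine ⟨List.Pairwise.sublist (enumFilter_sublist _ roots 0) h2, by simp, ?_⟩
      intro x hx y hy v hvx hvy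
      simp only [List.mem_singleton] at hy
      subst hy
      rcases List.mem_map.1 hx with ⟨kc, hkcf, rfl⟩
      have hkcQ := (List.mem_filter.1 hkcf).2
      have hkcm := (List.mem_filter.1 hkcf).1
      rcases mem_enum roots 0 kc hkcm with ⟨i, hi, rfl⟩
      simp only [zero_add, decide_eq_true_eq] at hkcQ
      have hija : i ≠ ja := by omega
      have hijb : i ≠ jb := by omega
      rw [hnode_leaves v] at hvy
      rcases hvy with hvy | hvy
      · exact disj_getElem roots h2 i ja hi hja hija v hvx hvy
      · exact disj_getElem roots h2 i jb hi hjb hijb v hvx hvy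

-- main simulation step
lemma step_inv (roots : List PyTree) (comps : List (PySem.Set Int × Int)) (e : Int × Int)
    (h1 : List.Forall₂ RelTC roots comps) (h2 : DisjF roots) :
    List.Forall₂ RelTC (heightsStepA roots e) (heightsStepB comps e) ∧
      DisjF (heightsStepA roots e) := by
  by_cases ha : ∃ j, ∃ _hj : j < roots.length, e.1 ∈ PyTree.leaves (roots[j])
  · rcases ha with ⟨ja, hja, hmema⟩
    by_cases hb : ∃ j, ∃ _hj : j < roots.length, e.2 ∈ PyTree.leaves (roots[j])
    · rcases hb with ⟨jb, hjb, hmemb⟩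
      exact step_case_ss roots comps e h1 h2 ja hja hmema jb hjb hmemb
    · push Not at hb
      refine step_case_sn roots comps e h1 h2 ja hja hmema ?_
      intro x hx
      rcases List.mem_iff_getElem.1 hx with ⟨k, hk, rfl⟩
      exact hb k hk
  · by_cases hb : ∃ j, ∃ _hj : j < roots.length, e.2 ∈ PyTree.leaves (roots[j])
    · rcases hb with ⟨jb, hjb, hmemb⟩
      push Not at ha
      refine step_case_ns roots comps e h1 h2 jb hjb hmemb ?_
      intro x hx
      rcases List.mem_iff_getElem.1 hx with ⟨k, hk, rfl⟩
      exact ha k hk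
    · push Not at ha
      push Not at hb
      refine step_case_nn roots comps e h1 h2 ?_ ?_
      · intro x hx
        rcases List.mem_iff_getElem.1 hx with ⟨k, hk, rfl⟩
        exact ha k hk
      · intro x hx
        rcases List.mem_iff_getElem.1 hx with ⟨k, hk, rfl⟩
        exact hb k hk

lemma fold_inv (edges : List (Int × Int)) (roots : List PyTree) (comps : List (PySem.Set Int × Int))
    (h1 : List.Forall₂ RelTC roots comps) (h2 : DisjF roots) :
    List.Forall₂ RelTC (edges.foldl heightsStepA roots) (edges.foldl heightsStepB comps) ∧
      DisjF (edges.foldl heightsStepA roots) := by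
  induction edges generalizing roots comps with
  | nil => exact ⟨h1, h2⟩
  | cons e es ih =>
      obtain ⟨h1', h2'⟩ := step_inv roots comps e h1 h2
      exact ih _ _ h1' h2'

lemma forall2_map_heights {roots : List PyTree} {comps : List (PySem.Set Int × Int)}
    (h : List.Forall₂ RelTC roots comps) :
    comps.map (fun c => c.2) = roots.map PyTree.height := by
  induction h with
  | nil => rfl
  | cons hxy htail ih => simpa [ih] using hxy.2

-- ===== VERDICT (by name: the statement is the Claim_ definition above) =====
theorem heights_spec : Claim_equal_heights := by
  intro initlist t _
  unfold Spec_heights heights heights_alt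
  obtain ⟨h1, _⟩ := fold_inv (PySem.List.slice initlist none (some t)) [] [] List.Forall₂.nil (by simp [DisjF])
  simp only []
  rw [PySem.List.foldl_append_singleton_eq_map, forall2_map_heights h1]
  simp
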